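-- pv_equiv track=rewrite | github.com/TrashBoatDora/CodeQL-query_derive | cwe_processor_all_in_one.py | _dedupe_and_coalesce_regions
-- ===== SOURCE A (Python) =====
-- from typing import List, Tuple, Dict
--
-- def _merge_ranges(ranges: List[Tuple[int, int]]) -> List[Tuple[int, int]]:
--     if not ranges:
--         return []
--     ranges = list(ranges)
--     ranges.sort()
--     merged = [list(ranges[0])]
--     for a, b in ranges[1:]:
--         last = merged[-1]
--         if a <= last[1] + 1:
--             last[1] = max(last[1], b)
--         else:
--             merged.append([a, b])
--     return [tuple(x) for x in merged]
--
-- def _dedupe_and_coalesce_regions(regions):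
--     uniq = []
--     seen = set()
--     for r in regions:
--         key = (r[0], r[1], r[2], r[3], r[4])
--         if key in seen:
--             continue
--         seen.add(key)
--         uniq.append(r)
--
--     full_ranges = []
--     partials = []
--     for sL, sC, eL, eC, full in uniq:
--         if full:
--             full_ranges.append((sL, eL))
--         else:
--             partials.append((sL, sC, eL, eC))
--
--     merged_full = _merge_ranges(full_ranges)
--
--     def covered_by_full(sL, eL):
--         for a, b in merged_full:
--             if sL >= a and eL <= b:
--                 return True
--         return False
--
--     kept_partials = []
--     seen_partials = set()
--     for sL, sC, eL, eC in partials: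
--         if covered_by_full(sL, eL):
--             continue
--         k = (sL, sC, eL, eC)
--         if k in seen_partials:
--             continue
--         seen_partials.add(k)
--         kept_partials.append((sL, sC, eL, eC))
--
--     out = []
--     for a, b in merged_full:
--         out.append((a, 1, b, 10**9, True))
--     for sL, sC, eL, eC in kept_partials:
--         out.append((sL, sC, eL, eC, False))
--     out.sort(key=lambda x: (x[0], x[1]), reverse=True)
--     return out
-- ===== SOURCE B (Python) =====
-- def _bisect_right(a, x):
--     lo, hi = 0, len(a)
--     while lo < hi:
--         mid = (lo + hi) // 2
--         if x < a[mid]: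
--             hi = mid
--         else:
--             lo = mid + 1
--     return lo
--
-- def _dedupe_and_coalesce_regions(regions):
--     # one pass: dedupe and partition at the same time
--     seen = set()
--     fulls = []
--     partials = []
--     for r in regions:
--         key = (r[0], r[1], r[2], r[3], r[4])
--         if key not in seen:
--             seen.add(key)
--             if key[4]:
--                 fulls.append((key[0], key[2]))
--             else:
--                 partials.append((key[0], key[1], key[2], key[3]))
--
--     # merge the full ranges: sort, then sweep with an explicit current range
--     fulls.sort()
--     merged = []
--     if fulls:
--         a, b = fulls[0]
--         for x, y in fulls[1:]:
--             if x <= b + 1: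
--                 if y > b:
--                     b = y
--             else:
--                 merged.append((a, b))
--                 a, b = x, y
--         merged.append((a, b))
--
--     # coverage test by binary search: starts are sorted; prefix maxima of ends
--     starts = [a for a, _ in merged]
--     prefmax = []
--     m = None
--     for _, b in merged:
--         m = b if m is None or b > m else m
--         prefmax.append(m)
--
--     out = [(a, 1, b, 10**9, True) for a, b in merged]
--     for sL, sC, eL, eC in partials:
--         k = _bisect_right(starts, sL)
--         if k == 0 or eL > prefmax[k - 1]:
--             out.append((sL, sC, eL, eC, False))
--     out.sort(key=lambda x: (x[0], x[1]), reverse=True)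
--     return out
-- ===== Notes on version B (the rewrite author's own statement) =====
-- stated objective: faster
-- what changed: B fuses the dedupe and partition passes into one loop and replaces A's per-partial linear scan of the merged full ranges by a binary search over their sorted start lines combined with a prefix-maximum table of their end lines.
import Mathlib
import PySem

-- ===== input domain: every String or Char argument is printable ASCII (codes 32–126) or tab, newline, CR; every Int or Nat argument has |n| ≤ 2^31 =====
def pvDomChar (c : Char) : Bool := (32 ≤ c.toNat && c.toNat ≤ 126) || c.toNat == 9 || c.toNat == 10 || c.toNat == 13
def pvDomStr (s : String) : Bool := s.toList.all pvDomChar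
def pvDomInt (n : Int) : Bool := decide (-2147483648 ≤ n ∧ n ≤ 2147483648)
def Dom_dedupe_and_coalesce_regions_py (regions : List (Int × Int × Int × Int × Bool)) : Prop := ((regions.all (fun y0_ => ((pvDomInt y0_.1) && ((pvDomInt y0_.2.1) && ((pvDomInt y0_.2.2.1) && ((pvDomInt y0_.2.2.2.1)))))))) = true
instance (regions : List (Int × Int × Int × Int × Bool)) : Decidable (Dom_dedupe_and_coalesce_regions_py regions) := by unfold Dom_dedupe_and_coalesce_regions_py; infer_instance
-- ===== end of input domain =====

-- B replaces A's per-partial linear scan over the merged full ranges by a binary search over their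
-- sorted start lines plus a prefix-maximum table of their end lines, and fuses A's dedupe and
-- partition passes into one (objective: faster; return value only, no argument is mutated).

-- ===== PORT A =====
-- _merge_ranges' for-loop: acc = merged[:-1], cur = merged[-1]
def pvMergeGoA (acc : List (Int × Int)) (cur : Int × Int) : List (Int × Int) → List (Int × Int)
  | [] => acc ++ [cur]
  | (a, b) :: rest =>
    if a ≤ cur.2 + 1 then pvMergeGoA acc (cur.1, max cur.2 b) rest
    else pvMergeGoA (acc ++ [cur]) (a, b) rest

-- _merge_ranges (ranges.sort() on pairs is Python's lexicographic tuple sort = sorted2 fst snd)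
def pvMergeRangesA (ranges : List (Int × Int)) : List (Int × Int) :=
  match PySem.List.sorted2 ranges (fun r => r.1) (fun r => r.2) with
  | [] => []
  | r :: rest => pvMergeGoA [] r rest

-- the dedupe loop: st = (seen, uniq)
def pvDedupGoA (st : PySem.Set (Int × Int × Int × Int × Bool) × List (Int × Int × Int × Int × Bool)) :
    List (Int × Int × Int × Int × Bool) →
    PySem.Set (Int × Int × Int × Int × Bool) × List (Int × Int × Int × Int × Bool)
  | [] => st
  | r :: rs =>
    if r ∈ st.1 then pvDedupGoA st rs
    else pvDedupGoA (PySem.Set.add st.1 r, st.2 ++ [r]) rs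

-- the partition loop: st = (full_ranges, partials)
def pvPartGoA (st : List (Int × Int) × List (Int × Int × Int × Int)) :
    List (Int × Int × Int × Int × Bool) → List (Int × Int) × List (Int × Int × Int × Int)
  | [] => st
  | (sL, sC, eL, eC, full) :: rs =>
    if full then pvPartGoA (st.1 ++ [(sL, eL)], st.2) rs
    else pvPartGoA (st.1, st.2 ++ [(sL, sC, eL, eC)]) rs

-- covered_by_full's early-returning scan
def pvCoveredA (mf : List (Int × Int)) (sL eL : Int) : Bool :=
  mf.any (fun ab => decide (sL ≥ ab.1) && decide (eL ≤ ab.2))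

-- the kept_partials loop: st = (seen_partials, kept_partials)
def pvKeptGoA (mf : List (Int × Int))
    (st : PySem.Set (Int × Int × Int × Int) × List (Int × Int × Int × Int)) :
    List (Int × Int × Int × Int) → List (Int × Int × Int × Int)
  | [] => st.2
  | (sL, sC, eL, eC) :: ps =>
    if pvCoveredA mf sL eL then pvKeptGoA mf st ps
    else if (sL, sC, eL, eC) ∈ st.1 then pvKeptGoA mf st ps
    else pvKeptGoA mf (PySem.Set.add st.1 (sL, sC, eL, eC), st.2 ++ [(sL, sC, eL, eC)]) ps

def dedupe_and_coalesce_regions_py (regions : List (Int × Int × Int × Int × Bool)) :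
    List (Int × Int × Int × Int × Bool) :=
  let uniq := (pvDedupGoA (PySem.Set.ofList [], []) regions).2
  let fp := pvPartGoA ([], []) uniq
  let mf := pvMergeRangesA fp.1
  let kept := pvKeptGoA mf (PySem.Set.ofList [], []) fp.2
  let out := mf.map (fun ab => (ab.1, (1 : Int), ab.2, (1000000000 : Int), true))
      ++ kept.map (fun p => (p.1, p.2.1, p.2.2.1, p.2.2.2, false))
  PySem.List.sorted2 out (fun x => x.1) (fun x => x.2.1) true

-- ===== PORT B =====
-- Source B's fused dedupe+partition loop: st = (seen, fulls, partials)
def pvFuseGoB (st : PySem.Set (Int × Int × Int × Int × Bool) × List (Int × Int) × List (Int × Int × Int × Int)) :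
    List (Int × Int × Int × Int × Bool) →
    PySem.Set (Int × Int × Int × Int × Bool) × List (Int × Int) × List (Int × Int × Int × Int)
  | [] => st
  | r :: rs =>
    if r ∈ st.1 then pvFuseGoB st rs
    else pvFuseGoB (PySem.Set.add st.1 r,
      if r.2.2.2.2 then (st.2.1 ++ [(r.1, r.2.2.1)], st.2.2)
      else (st.2.1, st.2.2 ++ [(r.1, r.2.1, r.2.2.1, r.2.2.2.1)])) rs

-- Source B's merge sweep with explicit current range (a, b), appending finished ranges to acc
def pvMergeGoB (acc : List (Int × Int)) (a b : Int) : List (Int × Int) → List (Int × Int)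
  | [] => acc ++ [(a, b)]
  | (x, y) :: t =>
    if x ≤ b + 1 then pvMergeGoB acc a (if y > b then y else b) t
    else pvMergeGoB (acc ++ [(a, b)]) x y t

-- Source B's prefix-maximum loop (m starts as None)
def pvPrefMaxGo (m : Option Int) (acc : List Int) : List (Int × Int) → List Int
  | [] => acc
  | (_, b) :: t =>
    let m' := match m with | none => b | some mv => if b > mv then b else mv
    pvPrefMaxGo (some m') (acc ++ [m']) t

-- Source B's _bisect_right is the textbook bisect.bisect_right lo/hi loop; PySem.List.bisectRight is
-- exact for it.  prefmax[k-1] is ported as getD (in Source B k ≥ 1 and k ≤ len(prefmax) hold at that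
-- access, so the default is never used).
-- Source B's merge block (fulls.sort(); sweep)
def pvMergeRangesB (fulls : List (Int × Int)) : List (Int × Int) :=
  match PySem.List.sorted2 fulls (fun r => r.1) (fun r => r.2) with
  | [] => []
  | (a, b) :: rest => pvMergeGoB [] a b rest

def dedupe_and_coalesce_regions_py_alt (regions : List (Int × Int × Int × Int × Bool)) :
    List (Int × Int × Int × Int × Bool) :=
  let st := pvFuseGoB (PySem.Set.ofList [], [], []) regions
  let merged := pvMergeRangesB st.2.1
  let starts := merged.map (fun ab => ab.1)
  let prefmax := pvPrefMaxGo none [] merged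
  let out := merged.map (fun ab => (ab.1, (1 : Int), ab.2, (1000000000 : Int), true))
  let out := st.2.2.foldl (fun acc p =>
      if PySem.List.bisectRight starts p.1 = 0 ∨
          prefmax.getD (PySem.List.bisectRight starts p.1 - 1) 0 < p.2.2.1
      then acc ++ [(p.1, p.2.1, p.2.2.1, p.2.2.2, false)] else acc) out
  PySem.List.sorted2 out (fun x => x.1) (fun x => x.2.1) true

-- ===== PRECONDITION & SPEC =====
def Spec_dedupe_and_coalesce_regions_py (regions : List (Int × Int × Int × Int × Bool)) (out : List (Int × Int × Int × Int × Bool)) : Prop := out = dedupe_and_coalesce_regions_py_alt regions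
instance (regions : List (Int × Int × Int × Int × Bool)) (out : List (Int × Int × Int × Int × Bool)) : Decidable (Spec_dedupe_and_coalesce_regions_py regions out) := by unfold Spec_dedupe_and_coalesce_regions_py; infer_instance

-- ===== CLAIM (what is proved, stated in full; the proofs are below) =====
def Claim_equal_dedupe_and_coalesce_regions_py : Prop := ∀ (regions : List (Int × Int × Int × Int × Bool)), Dom_dedupe_and_coalesce_regions_py regions → Spec_dedupe_and_coalesce_regions_py regions (dedupe_and_coalesce_regions_py regions)

-- ===== LEMMAS AND PROOFS =====

-- an if-guarded append fold is filter+map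
theorem foldl_append_dite {α β : Type} (C : α → Prop) [DecidablePred C] (f : α → β) (l : List α) (acc : List β) :
    l.foldl (fun acc x => if C x then acc ++ [f x] else acc) acc
      = acc ++ (l.filter (fun x => decide (C x))).map f := by
  rw [← PySem.List.foldl_append_if (fun x => decide (C x)) f l acc]
  congr 1
  funext acc x
  by_cases h : C x <;> simp [h]

theorem pvMergeGoB_eq (t : List (Int × Int)) : ∀ acc a b,
    pvMergeGoB acc a b t = pvMergeGoA acc (a, b) t := by
  induction t with
  | nil => intro acc a b; rfl
  | cons h t ih =>
    intro acc a b
    obtain ⟨x, y⟩ := h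
    simp only [pvMergeGoB, pvMergeGoA]
    split
    · rw [ih]
      have : (if y > b then y else b) = max b y := by
        by_cases h : y > b <;> simp [h, max_def] <;> omega
      rw [this]
    · rw [ih]

-- B's merge block equals A's _merge_ranges
theorem pvMergeRangesB_eq (fulls : List (Int × Int)) :
    pvMergeRangesB fulls = pvMergeRangesA fulls := by
  unfold pvMergeRangesB pvMergeRangesA
  cases PySem.List.sorted2 fulls (fun r => r.1) (fun r => r.2) with
  | nil => rfl
  | cons r rest =>
    obtain ⟨a, b⟩ := r
    show pvMergeGoB [] a b rest = pvMergeGoA [] (a, b) rest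
    exact pvMergeGoB_eq rest [] a b

theorem pvDedupGoA_acc (rs : List (Int × Int × Int × Int × Bool)) :
    ∀ s u, pvDedupGoA (s, u) rs
      = ((pvDedupGoA (s, []) rs).1, u ++ (pvDedupGoA (s, []) rs).2) := by
  induction rs with
  | nil => intro s u; simp [pvDedupGoA]
  | cons r rs ih =>
    intro s u
    simp only [pvDedupGoA]
    by_cases h : r ∈ s <;> simp only [h, if_pos, if_neg, not_false_iff, ite_true, ite_false]
    · exact ih s u
    · rw [ih _ (u ++ [r]), ih _ ([] ++ [r])]
      simp

theorem pvFuseGoB_eq (rs : List (Int × Int × Int × Int × Bool)) :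
    ∀ s f p, pvFuseGoB (s, f, p) rs
      = ((pvDedupGoA (s, []) rs).1, pvPartGoA (f, p) (pvDedupGoA (s, []) rs).2) := by
  induction rs with
  | nil => intro s f p; rfl
  | cons r rs ih =>
    intro s f p
    simp only [pvFuseGoB, pvDedupGoA]
    by_cases h : r ∈ s <;> simp only [h, ite_true, ite_false]
    · exact ih s f p
    · rw [ih, pvDedupGoA_acc rs (PySem.Set.add s r) ([] ++ [r])]
      simp only [List.nil_append, List.singleton_append]
      have hpart : ∀ rest, pvPartGoA (f, p) (r :: rest)
          = pvPartGoA (if r.2.2.2.2 then (f ++ [(r.1, r.2.2.1)], p)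
              else (f, p ++ [(r.1, r.2.1, r.2.2.1, r.2.2.2.1)])) rest := by
        intro rest
        obtain ⟨sL, sC, eL, eC, full⟩ := r
        simp only [pvPartGoA]
        by_cases hf : full <;> simp [hf]
      rw [hpart]

theorem pvDedupGoA_nodup (rs : List (Int × Int × Int × Int × Bool)) :
    ∀ s u, u.Nodup → (∀ x ∈ u, x ∈ s) → (pvDedupGoA (s, u) rs).2.Nodup := by
  induction rs with
  | nil => intro s u hn _; exact hn
  | cons r rs ih =>
    intro s u hn hsub
    simp only [pvDedupGoA]
    by_cases h : r ∈ s <;> simp only [h, ite_true, ite_false]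
    · exact ih s u hn hsub
    · apply ih
      · rw [← List.concat_eq_append, List.nodup_concat]
        exact ⟨fun hr => h (hsub r hr), hn⟩
      · intro x hx
        rw [PySem.Set.mem_add]
        rcases List.mem_append.mp hx with h1 | h2
        · exact Or.inl (hsub x h1)
        · exact Or.inr (List.mem_singleton.mp h2)

theorem pvPartGoA_partials (u : List (Int × Int × Int × Int × Bool)) :
    ∀ f p, (pvPartGoA (f, p) u).2
      = p ++ (u.filter (fun r => !r.2.2.2.2)).map (fun r => (r.1, r.2.1, r.2.2.1, r.2.2.2.1)) := by
  induction u with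
  | nil => intro f p; simp [pvPartGoA]
  | cons r u ih =>
    intro f p
    obtain ⟨sL, sC, eL, eC, full⟩ := r
    simp only [pvPartGoA]
    by_cases h : full <;> simp [h, ih]

theorem pvKeptGoA_eq (mf : List (Int × Int)) (ps : List (Int × Int × Int × Int)) :
    ∀ s kept, ps.Nodup → (∀ p ∈ ps, p ∉ s) →
    pvKeptGoA mf (s, kept) ps = kept ++ ps.filter (fun p => !pvCoveredA mf p.1 p.2.2.1) := by
  induction ps with
  | nil => intro s kept _ _; simp [pvKeptGoA]
  | cons p ps ih =>
    intro s kept hn hns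
    obtain ⟨sL, sC, eL, eC⟩ := p
    simp only [pvKeptGoA]
    rw [List.nodup_cons] at hn
    by_cases hc : pvCoveredA mf sL eL
    · simp only [hc, ite_true]
      rw [ih s kept hn.2 (fun q hq => hns q (List.mem_cons_of_mem _ hq))]
      simp [List.filter_cons, hc]
    · simp only [hc, ite_false]
      have hnm : (sL, sC, eL, eC) ∉ s := hns _ (List.mem_cons_self ..)
      simp only [hnm, ite_false]
      rw [ih _ (kept ++ [(sL, sC, eL, eC)]) hn.2]
      · simp [List.filter_cons, hc]
      · intro q hq
        rw [PySem.Set.mem_add]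
        push Not
        exact ⟨hns q (List.mem_cons_of_mem _ hq), fun he => hn.1 (he ▸ hq)⟩

theorem sorted2_eq_sorted_lex (xs : List (Int × Int)) :
    PySem.List.sorted2 xs (fun r => r.1) (fun r => r.2) false
      = PySem.List.sorted xs (fun r => (toLex r : Lex (Int × Int))) := by
  rw [PySem.List.sorted_eq_foldl_insertBy]
  simp only [PySem.List.sorted2, Bool.false_eq_true, if_false]
  congr 1
  funext acc x
  congr 1
  funext a b
  rw [Bool.eq_iff_iff]
  simp only [Bool.or_eq_true, Bool.and_eq_true, Bool.not_eq_true', decide_eq_true_eq,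
    decide_eq_false_iff_not, Prod.Lex.lt_iff, ofLex_toLex]
  omega

theorem pvMergeGoA_fst_sorted : ∀ (rest : List (Int × Int)) (acc : List (Int × Int)) (cur : Int × Int),
    acc.Pairwise (fun p q => p.1 ≤ q.1) → (∀ z ∈ acc, z.1 ≤ cur.1) →
    (∀ r ∈ rest, cur.1 ≤ r.1) → rest.Pairwise (fun p q => p.1 ≤ q.1) →
    (pvMergeGoA acc cur rest).Pairwise (fun p q => p.1 ≤ q.1) := by
  intro rest
  induction rest with
  | nil =>
    intro acc cur hacc hle _ _
    simp only [pvMergeGoA]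
    rw [List.pairwise_append]
    exact ⟨hacc, List.pairwise_singleton _ _, fun a ha b hb => (List.mem_singleton.mp hb) ▸ hle a ha⟩
  | cons r t ih =>
    intro acc cur hacc hle hge hrest
    obtain ⟨a, b⟩ := r
    rw [List.pairwise_cons] at hrest
    simp only [pvMergeGoA]
    split
    · exact ih acc (cur.1, max cur.2 b) hacc hle
        (fun q hq => le_trans (hge _ (List.mem_cons_self ..)) (hrest.1 q hq)) hrest.2
    · have hca : cur.1 ≤ a := hge _ (List.mem_cons_self ..)
      apply ih
      · rw [List.pairwise_append]
        exact ⟨hacc, List.pairwise_singleton _ _,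
          fun x hx y hy => (List.mem_singleton.mp hy) ▸ hle x hx⟩
      · intro z hz
        rcases List.mem_append.mp hz with h1 | h2
        · exact le_trans (hle z h1) hca
        · rw [List.mem_singleton.mp h2]; exact hca
      · exact hrest.1
      · exact hrest.2

theorem pvMergeRangesA_fst_sorted (ranges : List (Int × Int)) :
    (pvMergeRangesA ranges).Pairwise (fun p q => p.1 ≤ q.1) := by
  unfold pvMergeRangesA
  rw [sorted2_eq_sorted_lex]
  have hp := PySem.List.sorted_pairwise ranges (fun r => (toLex r : Lex (Int × Int)))
  have hp' : (PySem.List.sorted ranges (fun r => (toLex r : Lex (Int × Int)))).Pairwise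
      (fun p q => p.1 ≤ q.1) := by
    refine hp.imp ?_
    intro p q h
    rcases Prod.Lex.le_iff.mp h with h1 | ⟨h1, _⟩
    · exact le_of_lt h1
    · exact le_of_eq h1
  cases hsl : PySem.List.sorted ranges (fun r => (toLex r : Lex (Int × Int))) with
  | nil => exact List.Pairwise.nil
  | cons r rest =>
    rw [hsl] at hp'
    rw [List.pairwise_cons] at hp'
    exact pvMergeGoA_fst_sorted rest [] r List.Pairwise.nil (by simp) hp'.1 hp'.2

theorem pvPrefMaxGo_acc (t : List (Int × Int)) :
    ∀ m acc, pvPrefMaxGo m acc t = acc ++ pvPrefMaxGo m [] t := by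
  induction t with
  | nil => intro m acc; simp [pvPrefMaxGo]
  | cons r t ih =>
    intro m acc
    obtain ⟨x, b⟩ := r
    simp only [pvPrefMaxGo]
    rw [ih _ (acc ++ [_]), ih _ ([] ++ [_])]
    simp

theorem pvPrefMaxGo_getD (t : List (Int × Int)) :
    ∀ m k, k < t.length →
      (pvPrefMaxGo (some m) [] t).getD k 0
        = (t.take (k + 1)).foldl (fun a p => max a p.2) m := by
  induction t with
  | nil => intro m k h; simp at h
  | cons r t ih =>
    intro m k hk
    obtain ⟨x, b⟩ := r
    simp only [pvPrefMaxGo]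
    rw [pvPrefMaxGo_acc]
    have hm : (if b > m then b else m) = max m b := by
      by_cases h : b > m <;> simp [h, max_def] <;> omega
    cases k with
    | zero => simp [hm, List.take, List.foldl]
    | succ k =>
      simp only [List.nil_append, List.singleton_append, List.getD_cons_succ, hm]
      rw [ih (max m b) k (by simpa using hk)]
      simp [List.take_succ_cons, List.foldl_cons]

theorem le_foldlmax_iff (l : List (Int × Int)) :
    ∀ m e, e ≤ l.foldl (fun a p => max a p.2) m ↔ e ≤ m ∨ ∃ p ∈ l, e ≤ p.2 := by
  induction l with
  | nil => intro m e; simp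
  | cons p l ih =>
    intro m e
    simp only [List.foldl_cons, ih, le_max_iff, List.mem_cons]
    constructor
    · rintro ((h | h) | ⟨q, hq, hle⟩)
      · exact Or.inl h
      · exact Or.inr ⟨p, Or.inl rfl, h⟩
      · exact Or.inr ⟨q, Or.inr hq, hle⟩
    · rintro (h | ⟨q, (rfl | hq), hle⟩)
      · exact Or.inl (Or.inl h)
      · exact Or.inl (Or.inr hle)
      · exact Or.inr ⟨q, hq, hle⟩

-- prefix-max table entry j over a list with head end-line hb

theorem prefmax_head (t0 : List (Int × Int)) (hb : Int) :
    ∀ j, j ≤ t0.length →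
      ((hb :: pvPrefMaxGo (some hb) [] t0).getD j 0)
        = (t0.take j).foldl (fun a p => max a p.2) hb := by
  intro j hj
  cases j with
  | zero => simp
  | succ j =>
    rw [List.getD_cons_succ, pvPrefMaxGo_getD t0 hb j (by omega)]

theorem covered_iff (ms : List (Int × Int)) (hs : ms.Pairwise (fun p q => p.1 ≤ q.1))
    (sL eL : Int) :
    pvCoveredA ms sL eL = false
      ↔ (PySem.List.bisectRight (ms.map (fun ab => ab.1)) sL = 0 ∨
          (pvPrefMaxGo none [] ms).getD (PySem.List.bisectRight (ms.map (fun ab => ab.1)) sL - 1) 0 < eL) := by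
  have hmap : (ms.map (fun ab => ab.1)).Pairwise (· ≤ ·) :=
    List.Pairwise.map (fun (ab : Int × Int) => ab.1) (fun _ _ h => h) hs
  obtain ⟨hk_le, hlt, hge⟩ := PySem.List.bisectRight_spec (ms.map (fun ab => ab.1)) sL hmap
  generalize hkdef : PySem.List.bisectRight (ms.map (fun ab => ab.1)) sL = k at hk_le hlt hge ⊢
  rw [List.length_map] at hk_le
  have hcov : pvCoveredA ms sL eL = true ↔ ∃ p ∈ ms.take k, eL ≤ p.2 := by
    rw [pvCoveredA, List.any_eq_true]
    constructor
    · rintro ⟨p, hp, hpc⟩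
      simp only [Bool.and_eq_true, decide_eq_true_eq, ge_iff_le] at hpc
      obtain ⟨i, hi, rfl⟩ := List.getElem_of_mem hp
      have hik : i < k := by
        by_contra hik
        have := hge i (by simpa using hi) (by omega)
        rw [List.getElem_map] at this
        omega
      exact ⟨ms[i], List.mem_take_iff_getElem.mpr ⟨i, by omega, rfl⟩, hpc.2⟩
    · rintro ⟨p, hp, hle⟩
      obtain ⟨j, hj, rfl⟩ := List.mem_take_iff_getElem.mp hp
      have hjlen : j < ms.length := by omega
      have h1 := hlt j (by simpa using hjlen) (by omega)
      rw [List.getElem_map] at h1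
      refine ⟨ms[j], List.getElem_mem hjlen, ?_⟩
      simp only [Bool.and_eq_true, decide_eq_true_eq, ge_iff_le]
      exact ⟨h1, hle⟩
  have hfalse : pvCoveredA ms sL eL = false ↔ ¬ (∃ p ∈ ms.take k, eL ≤ p.2) := by
    rw [← hcov]; cases pvCoveredA ms sL eL <;> simp
  rcases Nat.eq_zero_or_pos k with hk0 | hk1
  · simp [hfalse, hk0]
  · cases ms with
    | nil => simp at hk_le; omega
    | cons h0 t0 =>
      obtain ⟨a0, b0⟩ := h0
      obtain ⟨j, rfl⟩ : ∃ j, k = j + 1 := ⟨k - 1, by omega⟩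
      have hjlen : j ≤ t0.length := by simp at hk_le; omega
      have hpm : pvPrefMaxGo none [] ((a0, b0) :: t0)
          = b0 :: pvPrefMaxGo (some b0) [] t0 := by
        simp only [pvPrefMaxGo]
        rw [pvPrefMaxGo_acc]
        simp
      rw [hfalse, hpm]
      have hhd : (j + 1) - 1 = j := by omega
      rw [hhd, prefmax_head t0 b0 j hjlen]
      have hex : (∃ p ∈ ((a0, b0) :: t0).take (j + 1), eL ≤ p.2)
          ↔ eL ≤ (t0.take j).foldl (fun a p => max a p.2) b0 := by
        rw [List.take_succ_cons, le_foldlmax_iff]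
        simp
      rw [hex]
      omega

-- ===== VERDICT (by name: the statement is the Claim_ definition above) =====
theorem dedupe_and_coalesce_regions_py_spec : Claim_equal_dedupe_and_coalesce_regions_py := by
  intro regions _
  unfold Spec_dedupe_and_coalesce_regions_py
  simp only [dedupe_and_coalesce_regions_py, dedupe_and_coalesce_regions_py_alt]
  rw [pvFuseGoB_eq]
  dsimp only
  rw [pvMergeRangesB_eq]
  set uniq := (pvDedupGoA (PySem.Set.ofList [], []) regions).2 with huniq
  set fp := pvPartGoA ([], []) uniq with hfp
  set mf := pvMergeRangesA fp.1 with hmf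
  have hu : uniq.Nodup := by
    rw [huniq]
    exact pvDedupGoA_nodup regions _ [] List.nodup_nil (by intro x hx; simp at hx)
  have hpart : fp.2 = (uniq.filter (fun r => !r.2.2.2.2)).map
      (fun r => (r.1, r.2.1, r.2.2.1, r.2.2.2.1)) := by
    rw [hfp, pvPartGoA_partials]
    simp
  have hpnodup : fp.2.Nodup := by
    rw [hpart]
    apply List.Nodup.map_on ?_ (hu.filter _)
    intro x hx y hy hxy
    have hxf := List.of_mem_filter hx
    have hyf := List.of_mem_filter hy
    simp only [Bool.not_eq_true'] at hxf hyf
    obtain ⟨x1, x2, x3, x4, x5⟩ := x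
    obtain ⟨y1, y2, y3, y4, y5⟩ := y
    simp only [Prod.mk.injEq] at hxy ⊢
    simp only at hxf hyf
    refine ⟨hxy.1, hxy.2.1, hxy.2.2.1, hxy.2.2.2, ?_⟩
    rw [hxf, hyf]
  have hsorted : mf.Pairwise (fun p q => p.1 ≤ q.1) := by
    rw [hmf]; exact pvMergeRangesA_fst_sorted fp.1
  rw [pvKeptGoA_eq mf fp.2 (PySem.Set.ofList []) [] hpnodup
    (by intro p hp; simp [PySem.Set.ofList])]
  rw [foldl_append_dite]
  have hfc : fp.2.filter (fun p => decide (PySem.List.bisectRight (mf.map (fun ab => ab.1)) p.1 = 0 ∨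
        (pvPrefMaxGo none [] mf).getD (PySem.List.bisectRight (mf.map (fun ab => ab.1)) p.1 - 1) 0 < p.2.2.1))
      = fp.2.filter (fun p => !pvCoveredA mf p.1 p.2.2.1) := by
    apply List.filter_congr
    intro p _
    have hiff := covered_iff mf hsorted p.1 p.2.2.1
    cases hcv : pvCoveredA mf p.1 p.2.2.1
    · simp only [Bool.not_false]
      exact decide_eq_true (hiff.mp hcv)
    · have hnc : ¬ (PySem.List.bisectRight (mf.map (fun ab => ab.1)) p.1 = 0 ∨
          (pvPrefMaxGo none [] mf).getD (PySem.List.bisectRight (mf.map (fun ab => ab.1)) p.1 - 1) 0 < p.2.2.1) := by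
        intro hC
        rw [hiff.mpr hC] at hcv
        exact Bool.false_ne_true hcv
      simp only [Bool.not_true]
      exact decide_eq_false hnc
  rw [hfc]
  simp
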